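-- pv_equiv track=rewrite | github.com/kevin-bruton/autoinvesting | mt_connector/kpis.py | get_max_dd
-- ===== SOURCE A (Python) =====
-- def get_max_dd (balances):
--   last_high = balances[0]
--   cur_dd = 0
--   max_dd = 0
--   for balance in balances:
--     if balance < last_high:
--       cur_dd = last_high - balance
--     elif balance > last_high:
--       last_high = balance
--       cur_dd = 0
--     if cur_dd > max_dd:
--       max_dd = cur_dd
--   return max_dd
-- ===== SOURCE B (Python) =====
-- def get_max_dd(balances):
--     peak = balances[0]
--     peaks = []
--     for b in balances:
--         peak = max(peak, b)
--         peaks.append(peak)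
--     max_dd = 0
--     for p, b in zip(peaks, balances):
--         if p - b > max_dd:
--             max_dd = p - b
--     return max_dd
-- ===== Notes on version B (the rewrite author's own statement) =====
-- stated objective: alternative
-- what changed: Replaced A's fused single pass with a cur_dd/last_high state machine by a two-phase decomposition: first build the running-maximum (peak) table, then scan peak-balance drops for the maximum.
import Mathlib
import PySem

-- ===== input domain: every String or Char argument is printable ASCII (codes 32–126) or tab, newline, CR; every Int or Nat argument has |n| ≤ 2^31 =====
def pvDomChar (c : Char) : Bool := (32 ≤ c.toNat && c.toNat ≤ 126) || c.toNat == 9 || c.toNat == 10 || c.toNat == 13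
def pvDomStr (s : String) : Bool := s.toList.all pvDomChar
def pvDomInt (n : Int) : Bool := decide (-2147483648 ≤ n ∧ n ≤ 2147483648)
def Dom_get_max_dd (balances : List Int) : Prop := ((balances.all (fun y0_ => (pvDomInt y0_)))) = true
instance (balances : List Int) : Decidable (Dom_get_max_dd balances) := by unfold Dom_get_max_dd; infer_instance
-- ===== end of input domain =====

-- B replaces A's fused one-pass last_high/cur_dd state machine by a two-phase
-- decomposition (build the running-peak table, then scan peak−balance drops);
-- objective: alternative structure, same O(n) cost.

-- ===== PORT A =====
-- loop body of A: state (last_high, cur_dd, max_dd)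
def stepA (st : Int × Int × Int) (balance : Int) : Int × Int × Int :=
  if balance < st.1 then
    (st.1, st.1 - balance, if st.1 - balance > st.2.2 then st.1 - balance else st.2.2)
  else if balance > st.1 then
    (balance, 0, if (0 : Int) > st.2.2 then 0 else st.2.2)
  else
    (st.1, st.2.1, if st.2.1 > st.2.2 then st.2.1 else st.2.2)

def get_max_dd (balances : List Int) : Int :=
  match balances with
  | [] => 0  -- Python A raises IndexError on balances[0]; excluded by Pre_
  | b0 :: _ => (balances.foldl stepA (b0, 0, 0)).2.2

-- ===== PORT B =====
-- first loop of B: build the running-peak table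
def stepP (st : Int × List Int) (b : Int) : Int × List Int :=
  (max st.1 b, st.2 ++ [max st.1 b])

-- second loop of B: scan the drops
def stepB (max_dd : Int) (pb : Int × Int) : Int :=
  if pb.1 - pb.2 > max_dd then pb.1 - pb.2 else max_dd

def get_max_dd_alt (balances : List Int) : Int :=
  match balances with
  | [] => 0  -- Python B raises IndexError on balances[0]; excluded by Pre_
  | b0 :: _ =>
    let peaks := (balances.foldl stepP (b0, [])).2
    (peaks.zip balances).foldl stepB 0

-- ===== PRECONDITION & SPEC =====
-- Pre_ excludes only the empty list, on which both Pythons raise IndexError.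
def Pre_get_max_dd (balances : List Int) : Prop := balances ≠ []
instance (balances : List Int) : Decidable (Pre_get_max_dd balances) := by unfold Pre_get_max_dd; infer_instance
def pvWitness_get_max_dd : List Int := [1000, 900, 1100, 800]

def Spec_get_max_dd (balances : List Int) (out : Int) : Prop := out = get_max_dd_alt balances
instance (balances : List Int) (out : Int) : Decidable (Spec_get_max_dd balances out) := by unfold Spec_get_max_dd; infer_instance

-- ===== CLAIM (what is proved, stated in full; the proofs are below) =====
def Claim_equal_get_max_dd : Prop := ∀ (balances : List Int), Dom_get_max_dd balances → Pre_get_max_dd balances → Spec_get_max_dd balances (get_max_dd balances)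

-- ===== LEMMAS AND PROOFS =====

-- running-peak list starting from peak p
def peaksOf (p : Int) : List Int → List Int
  | [] => []
  | b :: t => (max p b) :: peaksOf (max p b) t

-- maximum drawdown of l relative to prior peak p (0 for [])
def S (p : Int) : List Int → Int
  | [] => 0
  | b :: t => max (max p b - b) (S (max p b) t)

theorem foldA_eq (l : List Int) : ∀ (p cur m : Int), cur ≤ m → 0 ≤ m →
    (l.foldl stepA (p, cur, m)).2.2 = max m (S p l) := by
  induction l with
  | nil => intro p cur m h1 h2; simp [S]; omega
  | cons b t ih =>
    intro p cur m h1 h2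
    simp only [List.foldl_cons, S, stepA]
    by_cases h : b < p
    · have hpb : max p b = p := by omega
      simp only [if_pos h, hpb]
      by_cases h' : p - b > m
      · simp only [if_pos h']
        rw [ih p (p - b) (p - b) le_rfl (by omega)]
        omega
      · simp only [if_neg h']
        rw [ih p (p - b) m (by omega) h2]
        omega
    · by_cases h'' : b > p
      · have hpb : max p b = b := by omega
        simp only [if_neg h, if_pos h'', hpb]
        have : ¬ ((0:Int) > m) := by omega
        simp only [if_neg this]
        rw [ih b 0 m h2 h2]
        omega
      · have hpb : max p b = p := by omega
        simp only [if_neg h, if_neg h'', hpb]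
        have : ¬ (cur > m) := by omega
        simp only [if_neg this]
        rw [ih p cur m h1 h2]
        omega

theorem foldP_eq (l : List Int) : ∀ (p : Int) (acc : List Int),
    (l.foldl stepP (p, acc)).2 = acc ++ peaksOf p l := by
  induction l with
  | nil => intro p acc; simp [peaksOf]
  | cons b t ih =>
    intro p acc
    simp only [List.foldl_cons, stepP, peaksOf]
    rw [ih]
    simp

theorem foldB_eq (l : List Int) : ∀ (p m : Int), 0 ≤ m →
    (((peaksOf p l).zip l).foldl stepB m) = max m (S p l) := by
  induction l with
  | nil => intro p m h; simp [peaksOf, S]; omega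
  | cons b t ih =>
    intro p m h
    simp only [peaksOf, List.zip_cons_cons, List.foldl_cons, stepB, S]
    by_cases h' : max p b - b > m
    · simp only [if_pos h']
      rw [ih (max p b) (max p b - b) (by omega)]
      omega
    · simp only [if_neg h']
      rw [ih (max p b) m h]
      omega

-- ===== VERDICT (by name: the statement is the Claim_ definition above) =====
theorem get_max_dd_spec : Claim_equal_get_max_dd := by
  intro balances _ hpre
  unfold Spec_get_max_dd
  cases balances with
  | nil => exact absurd rfl hpre
  | cons b0 t =>
    show (List.foldl stepA (b0, 0, 0) (b0 :: t)).2.2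
        = ((List.foldl stepP (b0, []) (b0 :: t)).2.zip (b0 :: t)).foldl stepB 0
    rw [foldA_eq (b0 :: t) b0 0 0 le_rfl le_rfl, foldP_eq (b0 :: t) b0 []]
    rw [List.nil_append, foldB_eq (b0 :: t) b0 0 le_rfl]
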